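-- pv_equiv track=rewrite | github.com/Rakshita-0206/SEIR_Project1_and_Project2 | fetch_page.py | compare_simhash
-- ===== SOURCE A (Python) =====
-- def cal_hash(word):
--     hash_sum = 0
--     for i in range(len(word)):
--         asci_val = ord(word[i])  # ascii value of char, it is find by "ord",need asci value calculating hash value
--         hash_fun = asci_val * (53 ** i)
--         hash_sum = hash_sum + hash_fun
--
--     hash_final = hash_sum % (2**64)
--     return hash_final
--
-- def hash_for_doc(word_dict):
--     v = []  # array of 64 numbers
--     for i in range(64):
--         v.append(0)  #  fill with zeros in the array
--
--
--     for word in word_dict: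
--         frequency = word_dict[word]
--         hash_value = cal_hash(word)
--         # convert hash to 64 bit binary
--         binary_str = bin(hash_value)[2:]
--         while len(binary_str) < 64:
--             binary_str = "0" + binary_str
--
--         # update v array based on bits present in the binary_str
--         for j in range(64):
--             if binary_str[j] == '1':
--                 v[j] = v[j] + frequency  # add if bit is 1
--             else:
--                 v[j] = v[j] - frequency  # subtract if bit is 0
--
--     # make final hash from v array
--     final_hash = 0
--     for j in range(64):
--         if v[j] > 0:  # if positive then bit is 1
--             # calculate 2^j, then add in the final hash
--             power = 1
--             for k in range(j):
--                 power = power * 2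
--             final_hash = final_hash + power  # add to final, at last this only we return
--
--     return final_hash
--
-- def compare_simhash(word_dict1, word_dict2):
--     # getting the simhash for both documents
--     finger_print_1=hash_for_doc(word_dict1)
--     finger_print_2=hash_for_doc(word_dict2)
--
--     # convert both to 64 bit binary
--     bin1_d1 = bin(finger_print_1)[2:]
--     while len(bin1_d1) < 64:
--         bin1_d1 = "0" + bin1_d1
--
--     bin2_d2 = bin(finger_print_2)[2:]
--     while len(bin2_d2) < 64:
--         bin2_d2= "0" + bin2_d2
--
--     # count how many bits are same , these only says how much similar are the documents
--     similar_bit = 0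
--     for i in range(64):
--         if bin1_d1[i] == bin2_d2[i]:
--             similar_bit = similar_bit + 1
--     return similar_bit
-- ===== SOURCE B (Python) =====
-- def cal_hash(word):
--     # Horner evaluation of the base-53 polynomial, right to left
--     h = 0
--     for ch in reversed(word):
--         h = h * 53 + ord(ch)
--     return h % (2 ** 64)
--
-- def hash_for_doc(word_dict):
--     # majority test per bit: bit is 1 iff the total frequency of words whose
--     # hash has that bit set strictly exceeds half of the overall frequency
--     pairs = [(cal_hash(w), f) for w, f in word_dict.items()]
--     total = sum(f for _, f in pairs)
--     fp = 0
--     for k in range(64):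
--         ones = sum(f for h, f in pairs if (h >> (63 - k)) & 1)
--         if 2 * ones > total:
--             fp += 1 << k
--     return fp
--
-- def compare_simhash(word_dict1, word_dict2):
--     f1 = hash_for_doc(word_dict1)
--     f2 = hash_for_doc(word_dict2)
--     return 64 - bin(f1 ^ f2).count('1')
-- ===== Notes on version B (the rewrite author's own statement) =====
-- stated objective: alternative
-- what changed: B drops A's 64-entry add/subtract vote array entirely: it computes the total frequency once and decides each fingerprint bit by a per-bit majority threshold (bit set iff twice the frequency-sum of words having that hash bit exceeds the total), hashes by Horner's rule right-to-left instead of accumulating 53**i powers, and compares fingerprints with the closed form 64 - popcount(f1 ^ f2) instead of a padded binary-string character loop.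
import Mathlib
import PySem

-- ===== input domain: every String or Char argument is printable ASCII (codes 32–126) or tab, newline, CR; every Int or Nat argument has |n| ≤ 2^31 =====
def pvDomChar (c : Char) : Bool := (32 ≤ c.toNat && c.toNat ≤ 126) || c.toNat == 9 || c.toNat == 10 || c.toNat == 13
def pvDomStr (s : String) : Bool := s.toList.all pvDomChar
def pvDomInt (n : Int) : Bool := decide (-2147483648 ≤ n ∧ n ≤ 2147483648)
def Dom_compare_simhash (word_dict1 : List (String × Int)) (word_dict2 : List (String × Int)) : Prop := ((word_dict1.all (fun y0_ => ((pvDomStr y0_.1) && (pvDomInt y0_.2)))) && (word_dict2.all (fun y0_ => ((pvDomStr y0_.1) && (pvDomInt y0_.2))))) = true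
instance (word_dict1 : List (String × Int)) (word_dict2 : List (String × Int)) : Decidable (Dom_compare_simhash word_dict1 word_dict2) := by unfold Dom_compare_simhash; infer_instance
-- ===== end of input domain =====

-- B replaces A's 64-entry vote array by a per-bit majority threshold over a once-computed total
-- frequency, hashes by Horner's rule, and compares by 64 - popcount(f1 XOR f2) (alternative, same cost class).


-- ===== PORT A =====
-- for i in range(len(word)): every index is in range, so getD is exact
def cal_hash (word : String) : Nat :=
  ((List.range word.toList.length).foldl
    (fun hash_sum i => hash_sum + (word.toList.getD i ' ').toNat * 53 ^ i) 0) % 2 ^ 64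

-- the while-loop that prepends '0' until the length is 64
def pad64 (bs : List Char) : List Char := List.replicate (64 - bs.length) '0' ++ bs

-- `for word in word_dict: frequency = word_dict[word]` — word is a key, so the lookup
-- never raises and getD is exact; bin(h)[2:] is PySem.Int.toBinChars (h is nonnegative)
def hash_for_doc (word_dict : PySem.Dict String Int) : Nat :=
  let v : List Int := List.replicate 64 0
  let v := word_dict.keys.foldl (fun v word =>
    let frequency := word_dict.getD word 0
    let binary_str := pad64 (PySem.Int.toBinChars (cal_hash word))
    (List.range 64).foldl (fun v j =>
      if binary_str.getD j ' ' = '1' then v.set j (v.getD j 0 + frequency)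
      else v.set j (v.getD j 0 - frequency)) v) v
  (List.range 64).foldl (fun fh j =>
    if 0 < v.getD j 0 then fh + (List.range j).foldl (fun power _ => power * 2) 1 else fh) 0

def compare_simhash (word_dict1 : List (String × Int)) (word_dict2 : List (String × Int)) : Int :=
  let finger_print_1 := hash_for_doc (PySem.Dict.ofList word_dict1)
  let finger_print_2 := hash_for_doc (PySem.Dict.ofList word_dict2)
  let bin1_d1 := pad64 (PySem.Int.toBinChars finger_print_1)
  let bin2_d2 := pad64 (PySem.Int.toBinChars finger_print_2)
  (List.range 64).foldl
    (fun similar_bit i => if bin1_d1.getD i ' ' = bin2_d2.getD i ' ' then similar_bit + 1 else similar_bit)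
    (0 : Int)

-- ===== PORT B =====
-- Horner evaluation right to left
def cal_hash_alt (word : String) : Nat :=
  (word.toList.reverse.foldl (fun h ch => h * 53 + ch.toNat) 0) % 2 ^ 64

-- per-bit majority threshold: bit k is set iff 2 * ones > total
def hash_for_doc_alt (word_dict : PySem.Dict String Int) : Nat :=
  let pairs := word_dict.items.map (fun wf => (cal_hash_alt wf.1, wf.2))
  let total := pairs.foldl (fun s p => s + p.2) (0 : Int)
  (List.range 64).foldl (fun fp k =>
    let ones := pairs.foldl (fun s p => if (p.1 >>> (63 - k)) &&& 1 = 1 then s + p.2 else s) (0 : Int)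
    if 2 * ones > total then fp + (1 <<< k) else fp) 0

-- bin(f1 ^ f2).count('1'): bin(...) is PySem.Int.toBinChars0b (the argument is nonnegative)
def compare_simhash_alt (word_dict1 : List (String × Int)) (word_dict2 : List (String × Int)) : Int :=
  let f1 := hash_for_doc_alt (PySem.Dict.ofList word_dict1)
  let f2 := hash_for_doc_alt (PySem.Dict.ofList word_dict2)
  (64 : Int) - ((PySem.Int.toBinChars0b ((f1 ^^^ f2 : Nat) : Int)).count '1' : Int)

-- ===== PRECONDITION & SPEC =====
def Spec_compare_simhash (word_dict1 : List (String × Int)) (word_dict2 : List (String × Int)) (out : Int) : Prop := out = compare_simhash_alt word_dict1 word_dict2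
instance (word_dict1 : List (String × Int)) (word_dict2 : List (String × Int)) (out : Int) : Decidable (Spec_compare_simhash word_dict1 word_dict2 out) := by unfold Spec_compare_simhash; infer_instance

-- ===== CLAIM (what is proved, stated in full; the proofs are below) =====
def Claim_equal_compare_simhash : Prop := ∀ (word_dict1 : List (String × Int)) (word_dict2 : List (String × Int)), Dom_compare_simhash word_dict1 word_dict2 → Spec_compare_simhash word_dict1 word_dict2 (compare_simhash word_dict1 word_dict2)

-- ===== LEMMAS AND PROOFS =====

-- proof-side clean recursion for Nat.toDigits 2 (MSB first)
def binAux (n : Nat) : List Char :=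
  if _h : n < 2 then [Nat.digitChar n]
  else binAux (n / 2) ++ [Nat.digitChar (n % 2)]
decreasing_by exact Nat.div_lt_self (by omega) (by omega)

theorem toDigitsCore_eq_binAux : ∀ (fuel n : Nat) (ds : List Char), 0 < fuel → n < 2 ^ fuel →
    Nat.toDigitsCore 2 fuel n ds = binAux n ++ ds := by
  intro fuel
  induction fuel with
  | zero => intro n ds h _; omega
  | succ f ih =>
    intro n ds _ h
    rw [Nat.toDigitsCore]
    by_cases h2 : n < 2
    · have hd : n / 2 = 0 := by omega
      have hm : n % 2 = n := by omega
      rw [binAux.eq_def]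
      simp [hd, hm, h2]
    · have hd : ¬ (n / 2 = 0) := by omega
      have hf : 0 < f := by
        by_contra hc
        have : f = 0 := by omega
        subst this; simp at h; omega
      simp only [hd, if_false]
      rw [ih (n / 2) _ hf (by rw [pow_succ] at h; omega)]
      conv_rhs => rw [binAux.eq_def]
      simp [h2]

theorem toBinChars_natCast (n : Nat) : PySem.Int.toBinChars (n : Int) = binAux n := by
  have hnn : ¬ ((n : Int) < 0) := by simp
  simp only [PySem.Int.toBinChars, hnn, if_false, Int.toNat_natCast]
  have hlt : n < 2 ^ (n + 1) := by
    have h1 := Nat.lt_two_pow_self (n := n)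
    have h2 : (2 : Nat) ^ n ≤ 2 ^ (n + 1) := Nat.pow_le_pow_right (by omega) (by omega)
    omega
  rw [Nat.toDigits, toDigitsCore_eq_binAux (n + 1) n [] (by omega) hlt]
  simp

theorem binAux_reverse_getD : ∀ (n i : Nat),
    (binAux n).reverse.getD i '0' = if n.testBit i then '1' else '0' := by
  intro n
  induction n using Nat.strong_induction_on with
  | _ n ih =>
    intro i
    rw [binAux.eq_def]
    by_cases h2 : n < 2
    · interval_cases n <;> cases i <;>
        simp [List.getD, Nat.zero_testBit, Nat.testBit_succ] <;> decide
    · simp only [h2, dif_neg, not_false_iff, List.reverse_append, List.reverse_singleton]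
      cases i with
      | zero =>
        rcases Nat.mod_two_eq_zero_or_one n with h | h <;>
          simp [h, Nat.testBit, List.getD] <;> decide
      | succ i =>
        simp only [List.cons_append, List.nil_append, List.getD_eq_getElem?_getD,
          List.getElem?_cons_succ]
        have hih := ih (n / 2) (Nat.div_lt_self (by omega) (by omega)) i
        rw [List.getD_eq_getElem?_getD] at hih
        rw [hih, Nat.testBit_succ]

theorem binAux_length_le {n k : Nat} (hk : 0 < k) (h : n < 2 ^ k) : (binAux n).length ≤ k := by
  induction k generalizing n with
  | zero => omega
  | succ k ih =>
    rw [binAux.eq_def]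
    by_cases h2 : n < 2
    · rw [dif_pos h2]
      simp
    · have hk' : 0 < k := by
        by_contra hc
        have : k = 0 := by omega
        subst this; simp at h; omega
      have := ih hk' (n := n / 2) (by rw [pow_succ] at h; omega)
      rw [dif_neg h2]
      simp only [List.length_append, List.length_singleton]
      omega

theorem pad64_getD {bs : List Char} (hlen : bs.length ≤ 64) {j : Nat} (hj : j < 64) :
    (pad64 bs).getD j ' ' = bs.reverse.getD (63 - j) '0' := by
  unfold pad64
  simp only [List.getD_eq_getElem?_getD]
  by_cases hpad : j < 64 - bs.length
  · rw [List.getElem?_append_left (by simpa using hpad)]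
    rw [List.getElem?_eq_none (l := bs.reverse) (by simp; omega)]
    simp [hpad]
  · have hidx : j - (64 - bs.length) < bs.length := by omega
    rw [List.getElem?_append_right (by simpa using hpad), List.length_replicate]
    rw [List.getElem?_eq_getElem hidx]
    have hridx : 63 - j < bs.reverse.length := by simp; omega
    rw [List.getElem?_eq_getElem hridx]
    simp only [Option.getD_some, List.getElem_reverse]
    congr 1
    omega

-- the padded binary string of h < 2^64 read at j is bit 63-j of h
theorem pad64_toBinChars_getD {h : Nat} (hh : h < 2 ^ 64) {j : Nat} (hj : j < 64) :
    (pad64 (PySem.Int.toBinChars (h : Int))).getD j ' ' = if h.testBit (63 - j) then '1' else '0' := by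
  rw [toBinChars_natCast, pad64_getD (binAux_length_le (by omega) hh) hj, binAux_reverse_getD]

-- ---- the two hash functions agree ----

-- recursive value both hash loops compute
def chpoly : List Char → Nat
  | [] => 0
  | c :: t => c.toNat + 53 * chpoly t

theorem horner_eq_chpoly : ∀ l : List Char,
    l.reverse.foldl (fun h ch => h * 53 + ch.toNat) 0 = chpoly l := by
  intro l
  induction l with
  | nil => simp [chpoly]
  | cons c t ih =>
    simp only [List.reverse_cons, List.foldl_append, List.foldl_cons, List.foldl_nil, ih, chpoly]
    ring

theorem range_fold_eq_chpoly : ∀ (l : List Char) (a m : Nat),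
    (List.range l.length).foldl (fun hash_sum i => hash_sum + (l.getD i ' ').toNat * 53 ^ i * m) a
      = a + chpoly l * m := by
  intro l
  induction l with
  | nil => simp [chpoly]
  | cons c t ih =>
    intro a m
    rw [List.length_cons, List.range_succ_eq_map]
    simp only [List.foldl_cons, List.foldl_map, List.getD_cons_succ, List.getD_cons_zero,
      pow_zero, mul_one, pow_succ]
    have hbody : ∀ (s : Nat) (i : Nat),
        s + (t.getD i ' ').toNat * (53 ^ i * 53) * m = s + (t.getD i ' ').toNat * 53 ^ i * (53 * m) := by
      intro s i; ring
    rw [show (fun (hash_sum : Nat) (i : Nat) =>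
        hash_sum + (t.getD i ' ').toNat * (53 ^ i * 53) * m)
      = (fun (hash_sum : Nat) (i : Nat) =>
        hash_sum + (t.getD i ' ').toNat * 53 ^ i * (53 * m)) from funext fun s => funext fun i => hbody s i]
    rw [ih]
    simp [chpoly]
    ring

theorem cal_hash_alt_eq (word : String) : cal_hash_alt word = cal_hash word := by
  unfold cal_hash cal_hash_alt
  congr 1
  rw [horner_eq_chpoly]
  have h := range_fold_eq_chpoly word.toList 0 1
  simp only [mul_one, zero_add] at h
  rw [h]

theorem and_one_eq_testBit (x k : Nat) : ((x >>> k) &&& 1 = 1) ↔ x.testBit k = true := by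
  simp [Nat.testBit_eq_decide_div_mod_eq, Nat.and_one_is_mod, Nat.shiftRight_eq_div_pow]

theorem power_loop (j : Nat) : (List.range j).foldl (fun power _ => power * 2) 1 = 2 ^ j := by
  induction j with
  | zero => simp
  | succ j ih => rw [List.range_succ, List.foldl_append, ih, List.foldl_cons, List.foldl_nil, pow_succ]

-- ---- the vote array vs the per-bit majority sums ----

-- net vote of bit position j (MSB-first index) over hashed (hash, frequency) pairs
def votes (ps : List (Nat × Int)) (j : Nat) : Int :=
  ps.foldl (fun s p => if p.1.testBit (63 - j) then s + p.2 else s - p.2) 0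

theorem votes_eq_two_ones_sub_total (ps : List (Nat × Int)) (j : Nat) :
    votes ps j = 2 * (ps.foldl (fun s p => if p.1.testBit (63 - j) then s + p.2 else s) 0)
      - ps.foldl (fun s p => s + p.2) 0 := by
  unfold votes
  induction ps using List.reverseRecOn with
  | nil => simp
  | append_singleton l p ih =>
    simp only [List.foldl_append, List.foldl_cons, List.foldl_nil]
    by_cases hb : p.1.testBit (63 - j) = true <;> simp [hb] <;> omega

-- one word's inner loop over range n: each index below n gets its vote applied once
theorem inner_loop_getD (c : Nat → Bool) (f : Int) :
    ∀ (n : Nat) (v : List Int),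
      (((List.range n).foldl (fun v j =>
          if c j then v.set j (v.getD j 0 + f) else v.set j (v.getD j 0 - f)) v).length = v.length)
      ∧ (∀ j, n ≤ j → ((List.range n).foldl (fun v j =>
          if c j then v.set j (v.getD j 0 + f) else v.set j (v.getD j 0 - f)) v).getD j 0 = v.getD j 0)
      ∧ (∀ j, j < n → j < v.length → ((List.range n).foldl (fun v j =>
          if c j then v.set j (v.getD j 0 + f) else v.set j (v.getD j 0 - f)) v).getD j 0
          = (if c j then v.getD j 0 + f else v.getD j 0 - f)) := by
  intro n
  induction n with
  | zero => intro v; refine ⟨by simp, by simp, by omega⟩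
  | succ n ih =>
    intro v
    obtain ⟨ihlen, ihhigh, ihlow⟩ := ih v
    rw [List.range_succ]
    simp only [List.foldl_append, List.foldl_cons, List.foldl_nil]
    set w := (List.range n).foldl (fun v j =>
      if c j then v.set j (v.getD j 0 + f) else v.set j (v.getD j 0 - f)) v with hw
    have hstep_len : (if c n then w.set n (w.getD n 0 + f) else w.set n (w.getD n 0 - f)).length
        = w.length := by split_ifs <;> simp
    refine ⟨by rw [hstep_len, ihlen], ?_, ?_⟩
    · intro j hj
      have hne : n ≠ j := by omega
      have : (if c n then w.set n (w.getD n 0 + f) else w.set n (w.getD n 0 - f)).getD j 0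
          = w.getD j 0 := by
        split_ifs <;> simp [List.getD_eq_getElem?_getD, List.getElem?_set_ne hne]
      rw [this, ihhigh j (by omega)]
    · intro j hj hjv
      by_cases hjn : j < n
      · have hne : n ≠ j := by omega
        have : (if c n then w.set n (w.getD n 0 + f) else w.set n (w.getD n 0 - f)).getD j 0
            = w.getD j 0 := by
          split_ifs <;> simp [List.getD_eq_getElem?_getD, List.getElem?_set_ne hne]
        rw [this, ihlow j hjn hjv]
      · have hjeq : j = n := by omega
        subst hjeq
        have hjw : j < w.length := by rw [ihlen]; exact hjv
        have : (if c j then w.set j (w.getD j 0 + f) else w.set j (w.getD j 0 - f)).getD j 0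
            = (if c j then w.getD j 0 + f else w.getD j 0 - f) := by
          split_ifs <;> simp [List.getD_eq_getElem?_getD, List.getElem?_set_self hjw]
        rw [this, ihhigh j (le_refl j)]

-- the whole vote-array fold: entry j ends at votes ps j
theorem vote_array_getD (ps : List (Nat × Int)) :
    ∀ j, j < 64 →
      (ps.foldl (fun v (p : Nat × Int) =>
        (List.range 64).foldl (fun v j =>
          if p.1.testBit (63 - j) then v.set j (v.getD j 0 + p.2) else v.set j (v.getD j 0 - p.2)) v)
        (List.replicate 64 (0 : Int))).getD j 0 = votes ps j := by
  have main : ∀ (ps : List (Nat × Int)) (v : List Int), v.length = 64 →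
      ((ps.foldl (fun v (p : Nat × Int) =>
        (List.range 64).foldl (fun v j =>
          if p.1.testBit (63 - j) then v.set j (v.getD j 0 + p.2) else v.set j (v.getD j 0 - p.2)) v)
        v).length = 64)
      ∧ (∀ j, j < 64 → (ps.foldl (fun v (p : Nat × Int) =>
        (List.range 64).foldl (fun v j =>
          if p.1.testBit (63 - j) then v.set j (v.getD j 0 + p.2) else v.set j (v.getD j 0 - p.2)) v)
        v).getD j 0 = v.getD j 0 + votes ps j) := by
    intro ps
    induction ps with
    | nil => intro v hv; exact ⟨hv, by simp [votes]⟩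
    | cons p t ih =>
      intro v hv
      simp only [List.foldl_cons]
      obtain ⟨hlen, hhigh, hlow⟩ := inner_loop_getD (fun j => p.1.testBit (63 - j)) p.2 64 v
      set w := (List.range 64).foldl (fun v j =>
        if p.1.testBit (63 - j) then v.set j (v.getD j 0 + p.2) else v.set j (v.getD j 0 - p.2)) v with hwdef
      obtain ⟨ihlen, ihval⟩ := ih w (by rw [hlen, hv])
      refine ⟨ihlen, ?_⟩
      intro j hj
      rw [ihval j hj, hlow j hj (by omega)]
      unfold votes
      simp only [List.foldl_cons]
      have shift : ∀ (l : List (Nat × Int)) (a : Int),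
          l.foldl (fun s p => if p.1.testBit (63 - j) then s + p.2 else s - p.2) a
            = a + l.foldl (fun s p => if p.1.testBit (63 - j) then s + p.2 else s - p.2) 0 := by
        intro l
        induction l using List.reverseRecOn with
        | nil => simp
        | append_singleton l q ihq =>
          intro a
          rw [List.foldl_append, List.foldl_append, List.foldl_cons, List.foldl_cons,
            List.foldl_nil, List.foldl_nil, ihq a]
          split_ifs <;> ring
      rw [shift t (if p.1.testBit (63 - j) then 0 + p.2 else 0 - p.2)]
      split_ifs <;> omega
  intro j hj
  obtain ⟨_, hval⟩ := main ps (List.replicate 64 0) (by simp)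
  rw [hval j hj]
  have hz : (List.replicate 64 (0 : Int)).getD j 0 = 0 := by
    rw [List.getD_eq_getElem?_getD, List.getElem?_replicate]
    simp [hj]
  rw [hz, zero_add]

-- ---- fingerprint assembly ----

theorem final_fold_lt (c : Nat → Prop) [DecidablePred c] :
    ∀ n : Nat, (List.range n).foldl (fun fh j => if c j then fh + 2 ^ j else fh) 0 < 2 ^ n := by
  intro n
  induction n with
  | zero => simp
  | succ n ih =>
    rw [List.range_succ, List.foldl_append, List.foldl_cons, List.foldl_nil, pow_succ]
    split_ifs <;> omega

-- common normal form of both fingerprint folds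
def fpOf (ps : List (Nat × Int)) : Nat :=
  (List.range 64).foldl (fun fh j => if 0 < votes ps j then fh + 2 ^ j else fh) 0

theorem fpOf_lt (ps : List (Nat × Int)) : fpOf ps < 2 ^ 64 :=
  final_fold_lt _ 64

theorem hash_for_doc_eq_fpOf (d : PySem.Dict String Int) (hnd : d.keys.Nodup) :
    hash_for_doc d = fpOf (d.items.map (fun wf => (cal_hash wf.1, wf.2))) := by
  unfold hash_for_doc fpOf
  simp only []
  set ps := d.items.map (fun wf => (cal_hash wf.1, wf.2)) with hps
  have hitems := PySem.Dict.items_eq_map_keys d hnd 0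
  have hbody : d.keys.foldl (fun v word =>
      (List.range 64).foldl (fun v j =>
        if (pad64 (PySem.Int.toBinChars (cal_hash word))).getD j ' ' = '1'
        then v.set j (v.getD j 0 + d.getD word 0)
        else v.set j (v.getD j 0 - d.getD word 0)) v) (List.replicate 64 (0 : Int))
      = ps.foldl (fun v (p : Nat × Int) =>
        (List.range 64).foldl (fun v j =>
          if p.1.testBit (63 - j) then v.set j (v.getD j 0 + p.2) else v.set j (v.getD j 0 - p.2)) v)
        (List.replicate 64 (0 : Int)) := by
    rw [hps, hitems, List.map_map, List.foldl_map]
    apply PySem.List.foldl_congr_mem'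
    intro w _ acc
    apply PySem.List.foldl_congr_mem'
    intro j hj vacc
    rw [List.mem_range] at hj
    have hlt : cal_hash w < 2 ^ 64 := Nat.mod_lt _ (by positivity)
    rw [pad64_toBinChars_getD hlt hj]
    by_cases hb : (cal_hash w).testBit (63 - j) = true
    · simp [hb]
    · simp [hb]
  rw [hbody]
  apply PySem.List.foldl_congr_mem'
  intro j hj acc
  rw [List.mem_range] at hj
  rw [vote_array_getD ps j hj, power_loop]

theorem hash_for_doc_alt_eq_fpOf (d : PySem.Dict String Int) :
    hash_for_doc_alt d = fpOf (d.items.map (fun wf => (cal_hash wf.1, wf.2))) := by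
  unfold hash_for_doc_alt fpOf
  simp only []
  set ps := d.items.map (fun wf => (cal_hash wf.1, wf.2)) with hps
  have hmap : d.items.map (fun wf => (cal_hash_alt wf.1, wf.2)) = ps := by
    rw [hps]
    apply List.map_congr_left
    intro wf _
    rw [cal_hash_alt_eq]
  rw [hmap]
  apply PySem.List.foldl_congr_mem'
  intro k hk acc
  rw [List.mem_range] at hk
  have hones : ps.foldl (fun s (p : Nat × Int) => if (p.1 >>> (63 - k)) &&& 1 = 1 then s + p.2 else s) 0
      = ps.foldl (fun s (p : Nat × Int) => if p.1.testBit (63 - k) then s + p.2 else s) 0 := by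
    apply PySem.List.foldl_congr_mem'
    intro p _ s
    by_cases hb : p.1.testBit (63 - k) = true
    · rw [if_pos hb, if_pos ((and_one_eq_testBit _ _).mpr hb)]
    · rw [if_neg hb, if_neg (fun hc => hb ((and_one_eq_testBit _ _).mp hc))]
  rw [hones]
  have hiff : (ps.foldl (fun s p => s + p.2) 0
      < 2 * ps.foldl (fun s (p : Nat × Int) => if p.1.testBit (63 - k) then s + p.2 else s) 0)
      ↔ 0 < votes ps k := by
    rw [votes_eq_two_ones_sub_total]
    omega
  by_cases hc : 0 < votes ps k
  · rw [if_pos (hiff.mpr hc), if_pos hc, Nat.one_shiftLeft]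
  · rw [if_neg (fun h => hc (hiff.mp h)), if_neg hc]

-- ---- popcount ----

def pc (n : Nat) : Nat :=
  if _h : n = 0 then 0 else pc (n / 2) + n % 2
decreasing_by exact Nat.div_lt_self (by omega) (by omega)

theorem pc_zero : pc 0 = 0 := by rw [pc]; simp

theorem pc_rec (n : Nat) : pc n = pc (n / 2) + n % 2 := by
  by_cases h : n = 0
  · subst h; simp [pc_zero]
  · conv_lhs => rw [pc]
    simp [h]

theorem count_binAux_eq_pc : ∀ n, (binAux n).count '1' = pc n := by
  intro n
  induction n using Nat.strong_induction_on with
  | _ n ih =>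
    rw [binAux.eq_def]
    by_cases h2 : n < 2
    · have hpc1 : pc 1 = 1 := by rw [pc_rec]; simp [pc_zero]
      interval_cases n
      · rw [dif_pos (by omega), pc_zero]; decide
      · rw [dif_pos (by omega), hpc1]; decide
    · rw [dif_neg h2, List.count_append, ih (n / 2) (Nat.div_lt_self (by omega) (by omega)),
        pc_rec n]
      congr 1
      rcases Nat.mod_two_eq_zero_or_one n with h | h <;> rw [h] <;> decide

theorem countP_testBit_eq_pc : ∀ (k n : Nat), n < 2 ^ k →
    (List.range k).countP (fun i => n.testBit i) = pc n := by
  intro k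
  induction k with
  | zero =>
    intro n hn
    have : n = 0 := by simpa using hn
    subst this
    rw [pc]; simp
  | succ k ih =>
    intro n hn
    rw [List.range_succ_eq_map, List.countP_cons, List.countP_map]
    have hcong : (List.range k).countP ((fun i => n.testBit i) ∘ Nat.succ)
        = (List.range k).countP (fun i => (n / 2).testBit i) := by
      apply List.countP_congr
      intro i _
      simp [Function.comp, Nat.testBit_succ]
    rw [hcong, ih (n / 2) (by rw [pow_succ] at hn; omega), pc_rec (n := n)]
    rcases Nat.mod_two_eq_zero_or_one n with h | h <;>
      simp [Nat.testBit_zero, h]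

theorem count_toBinChars0b (n : Nat) (h : n < 2 ^ 64) :
    (PySem.Int.toBinChars0b (n : Int)).count '1'
      = (List.range 64).countP (fun i => n.testBit i) := by
  have h0b : PySem.Int.toBinChars0b (n : Int) = '0' :: 'b' :: PySem.Int.toBinChars (n : Int) := by
    have hnn : ¬ ((n : Int) < 0) := by simp
    simp [PySem.Int.toBinChars0b, PySem.Int.toBinChars, hnn]
  rw [h0b, List.count_cons, List.count_cons, toBinChars_natCast, count_binAux_eq_pc,
    countP_testBit_eq_pc 64 n h]
  simp

-- A's padded-string comparison loop equals 64 - popcount(f1 XOR f2)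
theorem similar_count {f1 f2 : Nat} (h1 : f1 < 2 ^ 64) (h2 : f2 < 2 ^ 64) :
    (List.range 64).foldl
      (fun similar_bit i => if (pad64 (PySem.Int.toBinChars (f1 : Int))).getD i ' '
          = (pad64 (PySem.Int.toBinChars (f2 : Int))).getD i ' ' then similar_bit + 1 else similar_bit)
      (0 : Int)
    = (64 : Int) - ((List.range 64).countP (fun i => (f1 ^^^ f2).testBit i) : Int) := by
  have step1 : (List.range 64).foldl
      (fun similar_bit i => if (pad64 (PySem.Int.toBinChars (f1 : Int))).getD i ' '
          = (pad64 (PySem.Int.toBinChars (f2 : Int))).getD i ' ' then similar_bit + 1 else similar_bit)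
      (0 : Int)
      = (List.range 64).foldl
      (fun similar_bit i => if f1.testBit (63 - i) = f2.testBit (63 - i) then similar_bit + 1 else similar_bit)
      (0 : Int) := by
    apply PySem.List.foldl_congr_mem'
    intro i hi acc
    rw [List.mem_range] at hi
    rw [pad64_toBinChars_getD h1 hi, pad64_toBinChars_getD h2 hi]
    rcases (f1.testBit (63 - i)) <;> rcases (f2.testBit (63 - i)) <;> simp
  rw [step1]
  have step2 : (List.range 64).foldl
      (fun similar_bit i => if f1.testBit (63 - i) = f2.testBit (63 - i) then similar_bit + 1 else similar_bit)
      (0 : Int)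
      = ((List.range 64).countP (fun i => f1.testBit (63 - i) == f2.testBit (63 - i)) : Int) := by
    have h := PySem.List.foldl_count_if (fun i => f1.testBit (63 - i) == f2.testBit (63 - i)) (List.range 64) 0
    simpa using h
  rw [step2]
  have hrefl : (List.range 64).countP (fun i => (f1 ^^^ f2).testBit (63 - i))
      = (List.range 64).countP (fun i => (f1 ^^^ f2).testBit i) := by
    have : ∀ (p : Nat → Bool), (List.range 64).countP (fun i => p (63 - i))
        = (List.range 64).countP p := by
      intro p
      have e1 : (List.range 64).countP (fun i => p (63 - i))
          = ∑ i ∈ Finset.range 64, if p (63 - i) then 1 else 0 := by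
        induction (64 : Nat) with
        | zero => simp
        | succ n ihn =>
          rw [List.range_succ, List.countP_append, Finset.sum_range_succ, ihn]
          simp [List.countP_cons]
      have e2 : (List.range 64).countP p = ∑ i ∈ Finset.range 64, if p i then 1 else 0 := by
        induction (64 : Nat) with
        | zero => simp
        | succ n ihn =>
          rw [List.range_succ, List.countP_append, Finset.sum_range_succ, ihn]
          simp [List.countP_cons]
      rw [e1, e2, ← Finset.sum_range_reflect (fun i => if p i then 1 else 0) 64]
    exact this _
  have key : (List.range 64).countP (fun i => f1.testBit (63 - i) == f2.testBit (63 - i))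
      + (List.range 64).countP (fun i => (f1 ^^^ f2).testBit i) = 64 := by
    have hlen := (List.length_eq_countP_add_countP
      (fun i => f1.testBit (63 - i) == f2.testBit (63 - i)) (l := List.range 64)).symm
    rw [List.length_range] at hlen
    have hcong : (List.range 64).countP
        (fun a => !(f1.testBit (63 - a) == f2.testBit (63 - a)))
        = (List.range 64).countP (fun i => (f1 ^^^ f2).testBit i) := by
      rw [← hrefl]
      apply List.countP_congr
      intro i _
      rw [Nat.testBit_xor]
      cases f1.testBit (63 - i) <;> cases f2.testBit (63 - i) <;> simp
    rw [show (fun a => decide ¬(f1.testBit (63 - a) == f2.testBit (63 - a)) = true)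
        = (fun a => !(f1.testBit (63 - a) == f2.testBit (63 - a))) from by
      funext a; cases f1.testBit (63 - a) <;> cases f2.testBit (63 - a) <;> rfl] at hlen
    rw [hcong] at hlen
    exact hlen
  omega

-- ===== VERDICT (by name: the statement is the Claim_ definition above) =====
theorem compare_simhash_spec : Claim_equal_compare_simhash := by
  intro wd1 wd2 _
  unfold Spec_compare_simhash compare_simhash compare_simhash_alt
  simp only []
  rw [hash_for_doc_eq_fpOf _ (PySem.Dict.nodup_keys_ofList _),
    hash_for_doc_eq_fpOf _ (PySem.Dict.nodup_keys_ofList _),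
    hash_for_doc_alt_eq_fpOf, hash_for_doc_alt_eq_fpOf]
  set p1 := fpOf ((PySem.Dict.ofList wd1).items.map (fun wf => (cal_hash wf.1, wf.2)))
  set p2 := fpOf ((PySem.Dict.ofList wd2).items.map (fun wf => (cal_hash wf.1, wf.2)))
  have h1 : p1 < 2 ^ 64 := fpOf_lt _
  have h2 : p2 < 2 ^ 64 := fpOf_lt _
  rw [similar_count h1 h2, count_toBinChars0b _ (Nat.xor_lt_two_pow h1 h2)]
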